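-- pv_equiv track=rewrite | github.com/PierfrancescoConti/PenTasker | tasker.py | clean_out_testssl
-- ===== SOURCE A (Python) =====
-- def clean_out_testssl(output):
--     out=output.split('\n')
--     ret=''
--     x=False
--     for line in out:
--         if ' Start ' in line or ' Done ' in line:
--             ret+=line + '\n\n'
--         elif 'Rating (experimental)' in line:
--             x=True
--             ret+=line + '\n'
--         elif x==False:
--             continue
--         else:
--             ret+=line + '\n'
--     return ret
-- ===== SOURCE B (Python) =====
-- def clean_out_testssl(output):
--     lines = output.split('\n')
--     # marker = index of the first line that flips A's flag: contains the rating
--     # header but is not a Start/Done banner line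
--     marker = None
--     for i, line in enumerate(lines):
--         if ('Rating (experimental)' in line
--                 and ' Start ' not in line and ' Done ' not in line):
--             marker = i
--             break
--     parts = []
--     for i, line in enumerate(lines):
--         if ' Start ' in line or ' Done ' in line:
--             parts.append(line + '\n\n')
--         elif marker is not None and i >= marker:
--             parts.append(line + '\n')
--     return ''.join(parts)
-- ===== Notes on version B (the rewrite author's own statement) =====
-- stated objective: alternative
-- what changed: Replaces the single pass with a mutable boolean flag by a two-phase decomposition: first compute the boundary index of the rating marker line, then a separate formatting pass over enumerated lines that keeps a line iff it is a Start/Done banner or lies at/after the marker, collecting parts in a list joined once.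
import Mathlib
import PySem

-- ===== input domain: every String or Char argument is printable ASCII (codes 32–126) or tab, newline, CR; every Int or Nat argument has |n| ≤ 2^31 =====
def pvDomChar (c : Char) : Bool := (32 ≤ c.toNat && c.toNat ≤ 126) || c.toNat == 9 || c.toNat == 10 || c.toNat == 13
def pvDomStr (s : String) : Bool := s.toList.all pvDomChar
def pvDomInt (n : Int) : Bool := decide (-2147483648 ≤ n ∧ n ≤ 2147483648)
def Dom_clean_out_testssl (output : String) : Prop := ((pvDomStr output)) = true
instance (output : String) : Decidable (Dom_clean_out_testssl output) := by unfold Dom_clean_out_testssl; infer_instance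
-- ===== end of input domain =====

-- B replaces A's single pass with a mutable flag by a two-phase decomposition
-- (find the rating-marker index first, then a separate formatting pass joined once);
-- same behaviour, same cost (objective: alternative).


-- ===== PORT A =====
-- loop body of A's for-loop (state = (ret, x))
def pvAStep (s : String × Bool) (line : String) : String × Bool :=
  if PySem.Str.isIn " Start " line || PySem.Str.isIn " Done " line then
    (s.1 ++ line ++ "\n\n", s.2)
  else if PySem.Str.isIn "Rating (experimental)" line then
    (s.1 ++ line ++ "\n", true)
  else if s.2 == false then s
  else (s.1 ++ line ++ "\n", s.2)

def clean_out_testssl (output : String) : String :=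
  -- output.split('\n'): '\n' is a nonempty literal, so Python's split never raises
  -- (Str.split? is none only for sep = ""); the .getD [] is unreachable.
  let out := (PySem.Str.split? output "\n").getD []
  (out.foldl pvAStep ("", false)).1

-- ===== PORT B =====
-- B's marker test: the line that flips A's flag
def pvMarkerHit (line : String) : Bool :=
  PySem.Str.isIn "Rating (experimental)" line
    && !PySem.Str.isIn " Start " line && !PySem.Str.isIn " Done " line

-- B's first loop: index of the first marker line (break on first hit)
def pvFindMarker : List (Int × String) → Option Int
  | [] => none
  | (i, l) :: rest => if pvMarkerHit l then some i else pvFindMarker rest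

-- loop body of B's formatting pass
def pvFmtStep (marker : Option Int) (acc : List String) : Int × String → List String
  | (i, line) =>
    if PySem.Str.isIn " Start " line || PySem.Str.isIn " Done " line then
      acc ++ [line ++ "\n\n"]
    else
      match marker with
      | some m => if m ≤ i then acc ++ [line ++ "\n"] else acc
      | none => acc

def clean_out_testssl_alt (output : String) : String :=
  let lines := (PySem.Str.split? output "\n").getD []
  let marker := pvFindMarker (PySem.List.enumerate lines)
  let parts := (PySem.List.enumerate lines).foldl (pvFmtStep marker) []
  PySem.Str.join "" parts

-- ===== PRECONDITION & SPEC =====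
def Spec_clean_out_testssl (output : String) (out : String) : Prop := out = clean_out_testssl_alt output
instance (output : String) (out : String) : Decidable (Spec_clean_out_testssl output out) := by unfold Spec_clean_out_testssl; infer_instance

-- ===== CLAIM (what is proved, stated in full; the proofs are below) =====
def Claim_equal_clean_out_testssl : Prop := ∀ (output : String), Dom_clean_out_testssl output → Spec_clean_out_testssl output (clean_out_testssl output)

-- ===== LEMMAS AND PROOFS =====

-- shared reference function: what both passes produce on a list of lines
def pvSD (l : String) : Bool := PySem.Str.isIn " Start " l || PySem.Str.isIn " Done " l
def pvRT (l : String) : Bool := PySem.Str.isIn "Rating (experimental)" l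

def pvF : List String → Bool → String
  | [], _ => ""
  | l :: ls, x =>
    if pvSD l then l ++ "\n\n" ++ pvF ls x
    else if pvRT l then l ++ "\n" ++ pvF ls true
    else if x then l ++ "\n" ++ pvF ls x
    else pvF ls x

theorem pvStr_append_assoc (a b c : String) : (a ++ b) ++ c = a ++ (b ++ c) := by
  apply String.toList_inj.mp; simp

theorem pvJoin_cons (s : String) (parts : List String) :
    PySem.Str.join "" (s :: parts) = s ++ PySem.Str.join "" parts := by
  apply String.toList_inj.mp
  simp [PySem.Str.join, PySem.Chars.join, List.intercalate, String.toList_ofList]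
  cases parts <;> simp

theorem pvJoin_nil : PySem.Str.join "" ([] : List String) = "" := rfl

theorem pvA_fold : ∀ (ls : List String) (ret : String) (x : Bool),
    (ls.foldl pvAStep (ret, x)).1 = ret ++ pvF ls x := by
  intro ls
  induction ls with
  | nil =>
    intro ret x
    apply String.toList_inj.mp; simp [pvF]
  | cons l ls ih =>
    intro ret x
    rw [List.foldl_cons]
    by_cases h1 : (PySem.Str.isIn " Start " l || PySem.Str.isIn " Done " l) = true
    · have hstep : pvAStep (ret, x) l = (ret ++ l ++ "\n\n", x) := by
        simp only [pvAStep]; rw [if_pos h1]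
      rw [hstep, ih]
      simp only [pvF, pvSD, pvRT, h1]
      try first | rfl | simp [pvStr_append_assoc]
    · rw [Bool.not_eq_true] at h1
      by_cases h2 : PySem.Str.isIn "Rating (experimental)" l = true
      · have hstep : pvAStep (ret, x) l = (ret ++ l ++ "\n", true) := by
          simp only [pvAStep]; rw [h1]
          simp only [Bool.false_eq_true, if_false]; rw [if_pos h2]
        rw [hstep, ih]
        simp only [pvF, pvSD, pvRT, h1, h2]
        try first | rfl | simp [pvStr_append_assoc]
      · rw [Bool.not_eq_true] at h2
        cases x with
        | false =>
          have hstep : pvAStep (ret, false) l = (ret, false) := by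
            simp only [pvAStep]; rw [h1, h2]; simp
          rw [hstep, ih]
          simp only [pvF, pvSD, pvRT, h1, h2]
          simp
        | true =>
          have hstep : pvAStep (ret, true) l = (ret ++ l ++ "\n", true) := by
            simp only [pvAStep]; rw [h1, h2]; simp
          rw [hstep, ih]
          simp only [pvF, pvSD, pvRT, h1, h2]
          try first | rfl | simp [pvStr_append_assoc]

theorem pvFmtStep_append (m : Option Int) (acc : List String) (p : Int × String) :
    pvFmtStep m acc p = acc ++ pvFmtStep m [] p := by
  obtain ⟨i, line⟩ := p
  cases m <;> simp only [pvFmtStep] <;> split_ifs <;> simp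

theorem pvFmt_shift (m : Option Int) (ps : List (Int × String)) : ∀ (acc : List String),
    ps.foldl (pvFmtStep m) acc = acc ++ ps.foldl (pvFmtStep m) [] := by
  induction ps with
  | nil => intro acc; simp
  | cons p ps ih =>
    intro acc
    rw [List.foldl_cons, List.foldl_cons, ih, ih (pvFmtStep m [] p),
        pvFmtStep_append m acc p, List.append_assoc]

theorem pvFindMarker_ge : ∀ (ls : List String) (k j : Int),
    pvFindMarker (PySem.List.enumerate ls k) = some j → k ≤ j := by
  intro ls
  induction ls with
  | nil => intro k j h; simp [PySem.List.enumerate_nil, pvFindMarker] at h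
  | cons l ls ih =>
    intro k j h
    rw [PySem.List.enumerate_cons] at h
    simp only [pvFindMarker] at h
    split_ifs at h with hh
    · have := Option.some.inj h; omega
    · have := ih (k + 1) j h; omega

theorem pvB_after : ∀ (ls : List String) (k j : Int), j ≤ k →
    PySem.Str.join "" ((PySem.List.enumerate ls k).foldl (pvFmtStep (some j)) []) = pvF ls true := by
  intro ls
  induction ls with
  | nil =>
    intro k j _
    rw [PySem.List.enumerate_nil, List.foldl_nil, pvJoin_nil]; rfl
  | cons l ls ih =>
    intro k j hjk
    rw [PySem.List.enumerate_cons, List.foldl_cons, pvFmt_shift]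
    by_cases h1 : (PySem.Str.isIn " Start " l || PySem.Str.isIn " Done " l) = true
    · have hstep : pvFmtStep (some j) [] (k, l) = [l ++ "\n\n"] := by
        simp only [pvFmtStep]; rw [if_pos h1]; rfl
      rw [hstep, List.singleton_append, pvJoin_cons, ih (k + 1) j (by omega)]
      simp only [pvF, pvSD, pvRT, h1]
      rfl
    · rw [Bool.not_eq_true] at h1
      have hstep : pvFmtStep (some j) [] (k, l) = [l ++ "\n"] := by
        simp only [pvFmtStep]; rw [h1]
        simp only [Bool.false_eq_true, if_false]
        rw [if_pos hjk]; rfl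
      rw [hstep, List.singleton_append, pvJoin_cons, ih (k + 1) j (by omega)]
      simp only [pvF, pvSD, pvRT, h1]
      by_cases h2 : PySem.Str.isIn "Rating (experimental)" l = true
      · simp only [h2]
        rfl
      · rw [Bool.not_eq_true] at h2
        simp only [h2]
        simp [pvStr_append_assoc]

theorem pvB_main : ∀ (ls : List String) (k : Int),
    PySem.Str.join "" ((PySem.List.enumerate ls k).foldl
      (pvFmtStep (pvFindMarker (PySem.List.enumerate ls k))) []) = pvF ls false := by
  intro ls
  induction ls with
  | nil =>
    intro k
    rw [PySem.List.enumerate_nil, List.foldl_nil, pvJoin_nil]; rfl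
  | cons l ls ih =>
    intro k
    rw [PySem.List.enumerate_cons, List.foldl_cons]
    simp only [pvFindMarker]
    by_cases hm : pvMarkerHit l = true
    · -- the marker is this very line: it and everything after is kept
      rw [if_pos hm]
      simp only [pvMarkerHit, Bool.and_eq_true, Bool.not_eq_true'] at hm
      obtain ⟨⟨hR, hS⟩, hD⟩ := hm
      rw [pvFmt_shift]
      have hstep : pvFmtStep (some k) [] (k, l) = [l ++ "\n"] := by
        simp only [pvFmtStep]; rw [hS, hD]
        simp only [Bool.or_self, Bool.false_eq_true, if_false]
        rw [if_pos (le_refl k)]; rfl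
      rw [hstep, List.singleton_append, pvJoin_cons, pvB_after ls (k + 1) k (by omega)]
      simp only [pvF, pvSD, pvRT, hS, hD, hR]
      rfl
    · -- no marker yet: only Start/Done banner lines are kept at this step
      rw [if_neg hm]
      rw [pvFmt_shift]
      by_cases h1 : (PySem.Str.isIn " Start " l || PySem.Str.isIn " Done " l) = true
      · have hstep : pvFmtStep (pvFindMarker (PySem.List.enumerate ls (k + 1))) [] (k, l)
            = [l ++ "\n\n"] := by
          simp only [pvFmtStep]; rw [if_pos h1]; rfl
        rw [hstep, List.singleton_append, pvJoin_cons, ih (k + 1)]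
        simp only [pvF, pvSD, pvRT, h1]
        rfl
      · rw [Bool.not_eq_true, Bool.or_eq_false_iff] at h1
        obtain ⟨hS, hD⟩ := h1
        have hR : PySem.Str.isIn "Rating (experimental)" l = false := by
          cases hR : PySem.Str.isIn "Rating (experimental)" l with
          | false => rfl
          | true => exact absurd (by unfold pvMarkerHit; rw [hR, hS, hD]; rfl) hm
        have hstep : pvFmtStep (pvFindMarker (PySem.List.enumerate ls (k + 1))) [] (k, l)
            = [] := by
          cases hfm : pvFindMarker (PySem.List.enumerate ls (k + 1)) with
          | none => simp only [pvFmtStep]; rw [hS, hD]; simp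
          | some j =>
            have hge := pvFindMarker_ge ls (k + 1) j hfm
            simp only [pvFmtStep]; rw [hS, hD]
            simp only [Bool.or_self, Bool.false_eq_true, if_false]
            rw [if_neg (by omega : ¬ j ≤ k)]
        rw [hstep, List.nil_append, ih (k + 1)]
        simp only [pvF, pvSD, pvRT, hS, hD, hR]
        simp

-- ===== VERDICT (by name: the statement is the Claim_ definition above) =====
theorem clean_out_testssl_spec : Claim_equal_clean_out_testssl := by
  intro output _
  unfold Spec_clean_out_testssl
  simp only [clean_out_testssl, clean_out_testssl_alt]
  rw [pvA_fold, pvB_main]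
  apply String.toList_inj.mp; simp
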